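-- pv_equiv track=rewrite | github.com/manas-17045/LeetcodeSolutions | Leetcode 3801-3900/3869/3869.py | countFancy
-- ===== SOURCE A (Python) =====
-- def countFancy(l: int, r: int) -> int:
--     """
--     Counts the number of 'fancy' numbers in the range [l, r].
--     A number is fancy if its digits are monotonic or if its digit sum is a 'good sum'.
--
--     :param l: The lower bound of the range (inclusive).
--     :param r: The upper bound of the range (inclusive).
--     :return: The total count of fancy numbers within the specified range.
--     """
--     goodSums = set()
--     for i in range(1, 140):
--         strVal = str(i)
--         if len(strVal) == 1:
--             goodSums.add(i)
--         elif all(strVal[j] > strVal[j - 1] for j in range(1, len(strVal))):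
--             goodSums.add(i)
--         elif all(strVal[j] < strVal[j - 1] for j in range(1, len(strVal))):
--             goodSums.add(i)
--
--     def solve(n: int) -> int:
--
--         if n == 0:
--             return 0
--
--         numStr = str(n)
--         length = len(numStr)
--         memo = {}
--
--         def dp(idx, isBound, isZero, lastDigit, currentDir, digitSum):
--
--             if idx == length:
--                 if isZero:
--                     return 0
--
--                 if currentDir != 3 or digitSum in goodSums:
--                     return 1
--
--                 return 0
--
--             state = (idx, isBound, isZero, lastDigit, currentDir, digitSum)
--             if state in memo:
--                 return memo[state]
--
--             limit = int(numStr[idx]) if isBound else 9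
--             ans = 0
--             for d in range(limit + 1):
--                 nextBound = isBound and (d == limit)
--                 if isZero:
--                     if d == 0:
--                         ans += dp(idx + 1, nextBound, True, -1, 0, 0)
--                     else:
--                         ans += dp(idx + 1, nextBound, False, d, 0, d)
--                 else:
--                     nextDir = currentDir
--                     if currentDir == 0:
--                         if d > lastDigit:
--                             nextDir = 1
--                         elif d < lastDigit:
--                             nextDir = 2
--                     elif currentDir == 1:
--                         if d > lastDigit:
--                             nextDir = 1
--                         else:
--                             nextDir = 3
--                     elif currentDir == 2:
--                         if d < lastDigit:
--                             nextDir = 2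
--                         else:
--                             nextDir = 3
--
--                     ans += dp(idx + 1, nextBound, False, d, nextDir, digitSum + d)
--
--             memo[state] = ans
--             return ans
--
--         return dp(0, True, True, -1, 0, 0)
--
--     return solve(r) - solve(l - 1)
-- ===== SOURCE B (Python) =====
-- def countFancy(l: int, r: int) -> int:
--     """Count 'fancy' numbers in [l, r] by inclusion-exclusion:
--     count(monotonic) + count(good digit sum) - count(both), each by its own
--     smaller-state digit DP, instead of one DP over the full combined state."""
--     goodSums = set()
--     for i in range(1, 140):
--         s = str(i)
--         if len(s) == 1:
--             goodSums.add(i)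
--         elif all(s[j] > s[j - 1] for j in range(1, len(s))):
--             goodSums.add(i)
--         elif all(s[j] < s[j - 1] for j in range(1, len(s))):
--             goodSums.add(i)
--
--     def next_dir(cur, last, d):
--         if cur == 0:
--             return 1 if d > last else (2 if d < last else cur)
--         if cur == 1:
--             return 1 if d > last else 3
--         if cur == 2:
--             return 2 if d < last else 3
--         return cur
--
--     def count_mono(n):
--         # numbers in [1, n] whose digits are monotonic (dir != 3)
--         if n == 0:
--             return 0
--         s = str(n)
--         L = len(s)
--         memo = {}
--
--         def dp(i, bound, zero, last, cur):
--             if i == L: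
--                 return 0 if zero else (1 if cur != 3 else 0)
--             key = (i, bound, zero, last, cur)
--             if key in memo:
--                 return memo[key]
--             lim = int(s[i]) if bound else 9
--             t = 0
--             for d in range(lim + 1):
--                 nb = bound and d == lim
--                 if zero:
--                     if d == 0:
--                         t += dp(i + 1, nb, True, -1, 0)
--                     else:
--                         t += dp(i + 1, nb, False, d, 0)
--                 else:
--                     t += dp(i + 1, nb, False, d, next_dir(cur, last, d))
--             memo[key] = t
--             return t
--
--         return dp(0, True, True, -1, 0)
--
--     def count_goodsum(n):
--         # numbers in [1, n] whose digit sum lies in goodSums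
--         if n == 0:
--             return 0
--         s = str(n)
--         L = len(s)
--         memo = {}
--
--         def dp(i, bound, zero, ssum):
--             if i == L:
--                 return 0 if zero else (1 if ssum in goodSums else 0)
--             key = (i, bound, zero, ssum)
--             if key in memo:
--                 return memo[key]
--             lim = int(s[i]) if bound else 9
--             t = 0
--             for d in range(lim + 1):
--                 nb = bound and d == lim
--                 if zero:
--                     if d == 0:
--                         t += dp(i + 1, nb, True, 0)
--                     else:
--                         t += dp(i + 1, nb, False, d)
--                 else:
--                     t += dp(i + 1, nb, False, ssum + d)
--             memo[key] = t
--             return t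
--
--         return dp(0, True, True, 0)
--
--     def count_both(n):
--         # numbers in [1, n] that are monotonic AND have a good digit sum
--         if n == 0:
--             return 0
--         s = str(n)
--         L = len(s)
--         memo = {}
--
--         def dp(i, bound, zero, last, cur, ssum):
--             if i == L:
--                 return 0 if zero else (1 if (cur != 3 and ssum in goodSums) else 0)
--             key = (i, bound, zero, last, cur, ssum)
--             if key in memo:
--                 return memo[key]
--             lim = int(s[i]) if bound else 9
--             t = 0
--             for d in range(lim + 1):
--                 nb = bound and d == lim
--                 if zero:
--                     if d == 0:
--                         t += dp(i + 1, nb, True, -1, 0, 0)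
--                     else:
--                         t += dp(i + 1, nb, False, d, 0, d)
--                 else:
--                     t += dp(i + 1, nb, False, d, next_dir(cur, last, d), ssum + d)
--             memo[key] = t
--             return t
--
--         return dp(0, True, True, -1, 0, 0)
--
--     def solve(n):
--         return count_mono(n) + count_goodsum(n) - count_both(n)
--
--     return solve(r) - solve(l - 1)
-- ===== Notes on version B (the rewrite author's own statement) =====
-- stated objective: alternative
-- what changed: Replaces the single digit DP over the full combined state (direction AND digit sum together, accepting on their disjunction) by inclusion-exclusion count_mono + count_goodsum - count_both, where count_mono and count_goodsum are independent digit DPs each tracking only the part of the state it needs.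
import Mathlib
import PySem

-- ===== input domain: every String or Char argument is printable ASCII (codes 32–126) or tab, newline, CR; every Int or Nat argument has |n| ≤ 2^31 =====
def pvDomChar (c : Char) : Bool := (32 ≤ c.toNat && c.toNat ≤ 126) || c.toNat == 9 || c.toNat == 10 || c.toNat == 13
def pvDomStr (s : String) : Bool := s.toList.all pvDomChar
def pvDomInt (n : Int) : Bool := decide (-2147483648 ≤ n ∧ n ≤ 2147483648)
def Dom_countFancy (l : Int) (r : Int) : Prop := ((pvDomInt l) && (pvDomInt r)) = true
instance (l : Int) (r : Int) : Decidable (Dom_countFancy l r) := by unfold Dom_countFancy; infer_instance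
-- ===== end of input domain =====

-- B replaces A's single full-state digit DP by inclusion-exclusion over three
-- smaller-state digit DPs (monotonic / good digit sum / both); same cost class.
-- Both Pythons memoize their dp in a dict; the ports thread that memo (a HashMap
-- keyed by the dp state, idx represented by the remaining suffix length) explicitly.

-- ===== PORT A =====

-- goodSums: built exactly as in A (single digit, strictly increasing, strictly decreasing)
def pvGoodSums : PySem.Set Int :=
  (PySem.List.pyRange 1 140 1).foldl (fun gs i =>
    let strVal := (PySem.Int.toStr i).toList
    if strVal.length == 1 then PySem.Set.add gs i
    else if (PySem.List.pyRange 1 (strVal.length) 1).all (fun j =>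
        decide (PySem.List.pyGetD strVal (j - 1) ' ' < PySem.List.pyGetD strVal j ' ')) then
      PySem.Set.add gs i
    else if (PySem.List.pyRange 1 (strVal.length) 1).all (fun j =>
        decide (PySem.List.pyGetD strVal j ' ' < PySem.List.pyGetD strVal (j - 1) ' ')) then
      PySem.Set.add gs i
    else gs) PySem.Set.empty

-- int(c) for one digit character; never none on the digit strings str(n), n ≥ 0 (Pre_ region)
def pvDigit (c : Char) : Int := (PySem.Int.ofStr? (String.ofList [c])).getD 0

-- limit = int(numStr[idx]) if isBound else 9
def pvLimit (isBound : Bool) (c : Char) : Int := if isBound then pvDigit c else 9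

-- A's nextDir if/elif chain
def pvNextDirA (currentDir lastDigit d : Int) : Int :=
  if currentDir == 0 then (if d > lastDigit then 1 else if d < lastDigit then 2 else currentDir)
  else if currentDir == 1 then (if d > lastDigit then (1 : Int) else 3)
  else if currentDir == 2 then (if d < lastDigit then (2 : Int) else 3)
  else currentDir

-- memo dict of A's dp: state (idx as remaining length, isBound, isZero, lastDigit, currentDir, digitSum)
abbrev pvMemoA := Std.HashMap (Nat × Bool × Bool × Int × Int × Int) Int

-- A's dp, recursing on the remaining suffix of str(n)'s characters (idx → suffix), memo threaded
def pvDpA : List Char → Bool → Bool → Int → Int → Int → pvMemoA → Int × pvMemoA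
  | [], _, isZero, _, currentDir, digitSum, memo =>
      (if isZero then 0
       else if currentDir ≠ 3 ∨ PySem.Set.contains pvGoodSums digitSum then 1 else 0, memo)
  | c :: t, isBound, isZero, lastDigit, currentDir, digitSum, memo =>
      match memo[(t.length + 1, isBound, isZero, lastDigit, currentDir, digitSum)]? with
      | some v => (v, memo)
      | none =>
        let p := (PySem.List.pyRange 0 (pvLimit isBound c + 1) 1).foldl (fun p d =>
          let r :=
            if isZero then
              if d == 0 then pvDpA t (isBound && (d == pvLimit isBound c)) true (-1) 0 0 p.2
              else pvDpA t (isBound && (d == pvLimit isBound c)) false d 0 d p.2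
            else
              pvDpA t (isBound && (d == pvLimit isBound c)) false d
                (pvNextDirA currentDir lastDigit d) (digitSum + d) p.2
          (p.1 + r.1, r.2)) ((0 : Int), memo)
        (p.1, p.2.insert (t.length + 1, isBound, isZero, lastDigit, currentDir, digitSum) p.1)

def pvSolveA (n : Int) : Int :=
  if n == 0 then 0 else (pvDpA (PySem.Int.toStr n).toList true true (-1) 0 0 ∅).1

def countFancy (l : Int) (r : Int) : Int := pvSolveA r - pvSolveA (l - 1)

-- ===== PORT B =====

-- shared direction-update step of B's three DPs (next_dir in Source B)
def pvNextDir (cur last d : Int) : Int :=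
  if cur == 0 then (if d > last then 1 else if d < last then 2 else cur)
  else if cur == 1 then (if d > last then (1 : Int) else 3)
  else if cur == 2 then (if d < last then (2 : Int) else 3)
  else cur

abbrev pvMemoMono := Std.HashMap (Nat × Bool × Bool × Int × Int) Int
abbrev pvMemoSum := Std.HashMap (Nat × Bool × Bool × Int) Int
abbrev pvMemoBoth := Std.HashMap (Nat × Bool × Bool × Int × Int × Int) Int

-- B's count_mono dp: tracks only bound/zero/last/direction
def pvDpMono : List Char → Bool → Bool → Int → Int → pvMemoMono → Int × pvMemoMono
  | [], _, zero, _, cur, memo => (if zero then 0 else if cur ≠ 3 then 1 else 0, memo)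
  | c :: t, bound, zero, last, cur, memo =>
      match memo[(t.length + 1, bound, zero, last, cur)]? with
      | some v => (v, memo)
      | none =>
        let p := (PySem.List.pyRange 0 (pvLimit bound c + 1) 1).foldl (fun p d =>
          let r :=
            if zero then
              if d == 0 then pvDpMono t (bound && (d == pvLimit bound c)) true (-1) 0 p.2
              else pvDpMono t (bound && (d == pvLimit bound c)) false d 0 p.2
            else pvDpMono t (bound && (d == pvLimit bound c)) false d (pvNextDir cur last d) p.2
          (p.1 + r.1, r.2)) ((0 : Int), memo)
        (p.1, p.2.insert (t.length + 1, bound, zero, last, cur) p.1)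

-- B's count_goodsum dp: tracks only bound/zero/digit sum
def pvDpSum : List Char → Bool → Bool → Int → pvMemoSum → Int × pvMemoSum
  | [], _, zero, ssum, memo =>
      (if zero then 0 else if PySem.Set.contains pvGoodSums ssum then 1 else 0, memo)
  | c :: t, bound, zero, ssum, memo =>
      match memo[(t.length + 1, bound, zero, ssum)]? with
      | some v => (v, memo)
      | none =>
        let p := (PySem.List.pyRange 0 (pvLimit bound c + 1) 1).foldl (fun p d =>
          let r :=
            if zero then
              if d == 0 then pvDpSum t (bound && (d == pvLimit bound c)) true 0 p.2
              else pvDpSum t (bound && (d == pvLimit bound c)) false d p.2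
            else pvDpSum t (bound && (d == pvLimit bound c)) false (ssum + d) p.2
          (p.1 + r.1, r.2)) ((0 : Int), memo)
        (p.1, p.2.insert (t.length + 1, bound, zero, ssum) p.1)

-- B's count_both dp: full state, accepting on the conjunction
def pvDpBoth : List Char → Bool → Bool → Int → Int → Int → pvMemoBoth → Int × pvMemoBoth
  | [], _, zero, _, cur, ssum, memo =>
      (if zero then 0
       else if cur ≠ 3 ∧ PySem.Set.contains pvGoodSums ssum then 1 else 0, memo)
  | c :: t, bound, zero, last, cur, ssum, memo =>
      match memo[(t.length + 1, bound, zero, last, cur, ssum)]? with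
      | some v => (v, memo)
      | none =>
        let p := (PySem.List.pyRange 0 (pvLimit bound c + 1) 1).foldl (fun p d =>
          let r :=
            if zero then
              if d == 0 then pvDpBoth t (bound && (d == pvLimit bound c)) true (-1) 0 0 p.2
              else pvDpBoth t (bound && (d == pvLimit bound c)) false d 0 d p.2
            else
              pvDpBoth t (bound && (d == pvLimit bound c)) false d
                (pvNextDir cur last d) (ssum + d) p.2
          (p.1 + r.1, r.2)) ((0 : Int), memo)
        (p.1, p.2.insert (t.length + 1, bound, zero, last, cur, ssum) p.1)

def pvCountMono (n : Int) : Int :=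
  if n == 0 then 0 else (pvDpMono (PySem.Int.toStr n).toList true true (-1) 0 ∅).1

def pvCountGoodsum (n : Int) : Int :=
  if n == 0 then 0 else (pvDpSum (PySem.Int.toStr n).toList true true 0 ∅).1

def pvCountBoth (n : Int) : Int :=
  if n == 0 then 0 else (pvDpBoth (PySem.Int.toStr n).toList true true (-1) 0 0 ∅).1

def pvSolveAlt (n : Int) : Int := pvCountMono n + pvCountGoodsum n - pvCountBoth n

def countFancy_alt (l : Int) (r : Int) : Int := pvSolveAlt r - pvSolveAlt (l - 1)

-- ===== PRECONDITION & SPEC =====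
-- Python A raises ValueError (int('-') on the leading sign of str(l-1) or str(r)) when l ≤ 0 or r < 0;
-- it returns normally exactly when l ≥ 1 and r ≥ 0.
def Pre_countFancy (l : Int) (r : Int) : Prop := 1 ≤ l ∧ 0 ≤ r
instance (l : Int) (r : Int) : Decidable (Pre_countFancy l r) := by unfold Pre_countFancy; infer_instance
def pvWitness_countFancy : Int × Int := (1, 20)

def Spec_countFancy (l : Int) (r : Int) (out : Int) : Prop := out = countFancy_alt l r
instance (l : Int) (r : Int) (out : Int) : Decidable (Spec_countFancy l r out) := by unfold Spec_countFancy; infer_instance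

-- ===== CLAIM (what is proved, stated in full; the proofs are below) =====
def Claim_equal_countFancy : Prop := ∀ (l : Int) (r : Int), Dom_countFancy l r → Pre_countFancy l r → Spec_countFancy l r (countFancy l r)

-- ===== LEMMAS AND PROOFS =====

-- memo-free versions of the four dps (proof-side only), same per-step bodies
def pvPureA : List Char → Bool → Bool → Int → Int → Int → Int
  | [], _, isZero, _, currentDir, digitSum =>
      if isZero then 0
      else if currentDir ≠ 3 ∨ PySem.Set.contains pvGoodSums digitSum then 1 else 0
  | c :: t, isBound, isZero, lastDigit, currentDir, digitSum =>
      (PySem.List.pyRange 0 (pvLimit isBound c + 1) 1).foldl (fun a d =>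
        a +
          (if isZero then
            if d == 0 then pvPureA t (isBound && (d == pvLimit isBound c)) true (-1) 0 0
            else pvPureA t (isBound && (d == pvLimit isBound c)) false d 0 d
          else
            pvPureA t (isBound && (d == pvLimit isBound c)) false d
              (pvNextDirA currentDir lastDigit d) (digitSum + d))) 0

def pvPureMono : List Char → Bool → Bool → Int → Int → Int
  | [], _, zero, _, cur => if zero then 0 else if cur ≠ 3 then 1 else 0
  | c :: t, bound, zero, last, cur =>
      (PySem.List.pyRange 0 (pvLimit bound c + 1) 1).foldl (fun a d =>
        a +
          (if zero then
            if d == 0 then pvPureMono t (bound && (d == pvLimit bound c)) true (-1) 0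
            else pvPureMono t (bound && (d == pvLimit bound c)) false d 0
          else pvPureMono t (bound && (d == pvLimit bound c)) false d (pvNextDir cur last d))) 0

def pvPureSum : List Char → Bool → Bool → Int → Int
  | [], _, zero, ssum =>
      if zero then 0 else if PySem.Set.contains pvGoodSums ssum then 1 else 0
  | c :: t, bound, zero, ssum =>
      (PySem.List.pyRange 0 (pvLimit bound c + 1) 1).foldl (fun a d =>
        a +
          (if zero then
            if d == 0 then pvPureSum t (bound && (d == pvLimit bound c)) true 0
            else pvPureSum t (bound && (d == pvLimit bound c)) false d
          else pvPureSum t (bound && (d == pvLimit bound c)) false (ssum + d))) 0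

def pvPureBoth : List Char → Bool → Bool → Int → Int → Int → Int
  | [], _, zero, _, cur, ssum =>
      if zero then 0
      else if cur ≠ 3 ∧ PySem.Set.contains pvGoodSums ssum then 1 else 0
  | c :: t, bound, zero, last, cur, ssum =>
      (PySem.List.pyRange 0 (pvLimit bound c + 1) 1).foldl (fun a d =>
        a +
          (if zero then
            if d == 0 then pvPureBoth t (bound && (d == pvLimit bound c)) true (-1) 0 0
            else pvPureBoth t (bound && (d == pvLimit bound c)) false d 0 d
          else
            pvPureBoth t (bound && (d == pvLimit bound c)) false d
              (pvNextDir cur last d) (ssum + d))) 0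

-- coherence of a memo with respect to the fixed digit string s (key length k picks the suffix)
def pvCohA (s : List Char) (m : pvMemoA) : Prop :=
  ∀ (k : Nat) (b z : Bool) (last cur ssum v : Int),
    m[(k, b, z, last, cur, ssum)]? = some v →
      v = pvPureA (s.drop (s.length - k)) b z last cur ssum

def pvCohMono (s : List Char) (m : pvMemoMono) : Prop :=
  ∀ (k : Nat) (b z : Bool) (last cur v : Int),
    m[(k, b, z, last, cur)]? = some v → v = pvPureMono (s.drop (s.length - k)) b z last cur

def pvCohSum (s : List Char) (m : pvMemoSum) : Prop :=
  ∀ (k : Nat) (b z : Bool) (ssum v : Int),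
    m[(k, b, z, ssum)]? = some v → v = pvPureSum (s.drop (s.length - k)) b z ssum

def pvCohBoth (s : List Char) (m : pvMemoBoth) : Prop :=
  ∀ (k : Nat) (b z : Bool) (last cur ssum v : Int),
    m[(k, b, z, last, cur, ssum)]? = some v →
      v = pvPureBoth (s.drop (s.length - k)) b z last cur ssum

-- a sum-accumulating foldl threading a memo equals the memo-free foldl, preserving coherence
theorem pv_foldl_pair {M : Type} (Coh : M → Prop) (xs : List Int)
    (f : Int → M → Int × M) (g : Int → Int)
    (hf : ∀ d ∈ xs, ∀ m, Coh m → (f d m).1 = g d ∧ Coh (f d m).2) :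
    ∀ (acc : Int) (m : M), Coh m →
      (xs.foldl (fun p d => (p.1 + (f d p.2).1, (f d p.2).2)) (acc, m)).1
          = xs.foldl (fun a d => a + g d) acc
        ∧ Coh (xs.foldl (fun p d => (p.1 + (f d p.2).1, (f d p.2).2)) (acc, m)).2 := by
  induction xs with
  | nil => intro acc m hm; exact ⟨rfl, hm⟩
  | cons x xs ih =>
    intro acc m hm
    have hx := hf x (List.mem_cons_self ..) m hm
    simp only [List.foldl_cons]
    rw [hx.1]
    exact ih (fun d hd => hf d (List.mem_cons_of_mem _ hd)) (acc + g x) (f x m).2 hx.2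

theorem pv_drop_suffix (s : List Char) (c : Char) (t : List Char) (h : c :: t <:+ s) :
    s.drop (s.length - (t.length + 1)) = c :: t := by
  have := (List.suffix_iff_eq_drop.mp h).symm
  simpa using this

-- memoized dp = pure dp (A)
theorem pv_memA (s : List Char) :
    ∀ ds, ds <:+ s → ∀ (b z : Bool) (last cur ssum : Int) (m : pvMemoA), pvCohA s m →
      (pvDpA ds b z last cur ssum m).1 = pvPureA ds b z last cur ssum ∧
        pvCohA s (pvDpA ds b z last cur ssum m).2 := by
  intro ds
  induction ds with
  | nil => intro _ b z last cur ssum m hm; exact ⟨rfl, hm⟩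
  | cons c t ih =>
    intro hsuf b z last cur ssum m hm
    have htsuf : t <:+ s := (List.suffix_cons c t).trans hsuf
    have hdrop := pv_drop_suffix s c t hsuf
    have hf : ∀ d ∈ PySem.List.pyRange 0 (pvLimit b c + 1) 1, ∀ m', pvCohA s m' →
        ((fun (d : Int) (m' : pvMemoA) =>
            if z then
              if d == 0 then pvDpA t (b && (d == pvLimit b c)) true (-1) 0 0 m'
              else pvDpA t (b && (d == pvLimit b c)) false d 0 d m'
            else pvDpA t (b && (d == pvLimit b c)) false d
              (pvNextDirA cur last d) (ssum + d) m') d m').1 =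
          (fun (d : Int) =>
            if z then
              if d == 0 then pvPureA t (b && (d == pvLimit b c)) true (-1) 0 0
              else pvPureA t (b && (d == pvLimit b c)) false d 0 d
            else pvPureA t (b && (d == pvLimit b c)) false d
              (pvNextDirA cur last d) (ssum + d)) d ∧
        pvCohA s ((fun (d : Int) (m' : pvMemoA) =>
            if z then
              if d == 0 then pvDpA t (b && (d == pvLimit b c)) true (-1) 0 0 m'
              else pvDpA t (b && (d == pvLimit b c)) false d 0 d m'
            else pvDpA t (b && (d == pvLimit b c)) false d
              (pvNextDirA cur last d) (ssum + d) m') d m').2 := by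
      intro d _ m' hm'
      cases z with
      | true =>
        by_cases hd : (d == 0) = true <;> simp only [hd, if_true, Bool.false_eq_true, if_false] <;>
          · apply ih htsuf
            exact hm'
      | false =>
        simp only [Bool.false_eq_true, if_false]
        apply ih htsuf
        exact hm'
    rcases hv : m[(t.length + 1, b, z, last, cur, ssum)]? with _ | v
    · -- memo miss: the foldl threads the memo, then the result is inserted
      obtain ⟨h1, h2⟩ := pv_foldl_pair (pvCohA s) (PySem.List.pyRange 0 (pvLimit b c + 1) 1)
        _ _ hf 0 m hm
      constructor
      · show (pvDpA (c :: t) b z last cur ssum m).1 = _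
        simp only [pvDpA, hv]
        exact h1
      · show pvCohA s (pvDpA (c :: t) b z last cur ssum m).2
        simp only [pvDpA, hv]
        intro k' b' z' l' c' s' v' hv'
        rw [Std.HashMap.getElem?_insert] at hv'
        split at hv'
        · rename_i heq
          obtain ⟨hk, hb, hz, hl, hc, hs⟩ := by simpa using (beq_iff_eq.mp heq)
          cases hv'
          subst hk hb hz hl hc hs
          rw [hdrop]
          exact h1
        · exact h2 _ _ _ _ _ _ _ hv'
    · -- memo hit
      have hval := hm _ _ _ _ _ _ _ hv
      rw [hdrop] at hval
      constructor
      · show (pvDpA (c :: t) b z last cur ssum m).1 = _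
        simp only [pvDpA, hv]
        exact hval
      · show pvCohA s (pvDpA (c :: t) b z last cur ssum m).2
        simp only [pvDpA, hv]
        exact hm

-- memoized dp = pure dp (B: mono)
theorem pv_memMono (s : List Char) :
    ∀ ds, ds <:+ s → ∀ (b z : Bool) (last cur : Int) (m : pvMemoMono), pvCohMono s m →
      (pvDpMono ds b z last cur m).1 = pvPureMono ds b z last cur ∧
        pvCohMono s (pvDpMono ds b z last cur m).2 := by
  intro ds
  induction ds with
  | nil => intro _ b z last cur m hm; exact ⟨rfl, hm⟩
  | cons c t ih =>
    intro hsuf b z last cur m hm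
    have htsuf : t <:+ s := (List.suffix_cons c t).trans hsuf
    have hdrop := pv_drop_suffix s c t hsuf
    have hf : ∀ d ∈ PySem.List.pyRange 0 (pvLimit b c + 1) 1, ∀ m', pvCohMono s m' →
        ((fun (d : Int) (m' : pvMemoMono) =>
            if z then
              if d == 0 then pvDpMono t (b && (d == pvLimit b c)) true (-1) 0 m'
              else pvDpMono t (b && (d == pvLimit b c)) false d 0 m'
            else pvDpMono t (b && (d == pvLimit b c)) false d (pvNextDir cur last d) m') d m').1 =
          (fun (d : Int) =>
            if z then
              if d == 0 then pvPureMono t (b && (d == pvLimit b c)) true (-1) 0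
              else pvPureMono t (b && (d == pvLimit b c)) false d 0
            else pvPureMono t (b && (d == pvLimit b c)) false d (pvNextDir cur last d)) d ∧
        pvCohMono s ((fun (d : Int) (m' : pvMemoMono) =>
            if z then
              if d == 0 then pvDpMono t (b && (d == pvLimit b c)) true (-1) 0 m'
              else pvDpMono t (b && (d == pvLimit b c)) false d 0 m'
            else pvDpMono t (b && (d == pvLimit b c)) false d (pvNextDir cur last d) m') d m').2 := by
      intro d _ m' hm'
      cases z with
      | true =>
        by_cases hd : (d == 0) = true <;> simp only [hd, if_true, Bool.false_eq_true, if_false] <;>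
          · apply ih htsuf
            exact hm'
      | false =>
        simp only [Bool.false_eq_true, if_false]
        apply ih htsuf
        exact hm'
    rcases hv : m[(t.length + 1, b, z, last, cur)]? with _ | v
    · obtain ⟨h1, h2⟩ := pv_foldl_pair (pvCohMono s) (PySem.List.pyRange 0 (pvLimit b c + 1) 1)
        _ _ hf 0 m hm
      constructor
      · show (pvDpMono (c :: t) b z last cur m).1 = _
        simp only [pvDpMono, hv]
        exact h1
      · show pvCohMono s (pvDpMono (c :: t) b z last cur m).2
        simp only [pvDpMono, hv]
        intro k' b' z' l' c' v' hv'
        rw [Std.HashMap.getElem?_insert] at hv'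
        split at hv'
        · rename_i heq
          obtain ⟨hk, hb, hz, hl, hc⟩ := by simpa using (beq_iff_eq.mp heq)
          cases hv'
          subst hk hb hz hl hc
          rw [hdrop]
          exact h1
        · exact h2 _ _ _ _ _ _ hv'
    · have hval := hm _ _ _ _ _ _ hv
      rw [hdrop] at hval
      constructor
      · show (pvDpMono (c :: t) b z last cur m).1 = _
        simp only [pvDpMono, hv]
        exact hval
      · show pvCohMono s (pvDpMono (c :: t) b z last cur m).2
        simp only [pvDpMono, hv]
        exact hm

-- memoized dp = pure dp (B: goodsum)
theorem pv_memSum (s : List Char) :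
    ∀ ds, ds <:+ s → ∀ (b z : Bool) (ssum : Int) (m : pvMemoSum), pvCohSum s m →
      (pvDpSum ds b z ssum m).1 = pvPureSum ds b z ssum ∧
        pvCohSum s (pvDpSum ds b z ssum m).2 := by
  intro ds
  induction ds with
  | nil => intro _ b z ssum m hm; exact ⟨rfl, hm⟩
  | cons c t ih =>
    intro hsuf b z ssum m hm
    have htsuf : t <:+ s := (List.suffix_cons c t).trans hsuf
    have hdrop := pv_drop_suffix s c t hsuf
    have hf : ∀ d ∈ PySem.List.pyRange 0 (pvLimit b c + 1) 1, ∀ m', pvCohSum s m' →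
        ((fun (d : Int) (m' : pvMemoSum) =>
            if z then
              if d == 0 then pvDpSum t (b && (d == pvLimit b c)) true 0 m'
              else pvDpSum t (b && (d == pvLimit b c)) false d m'
            else pvDpSum t (b && (d == pvLimit b c)) false (ssum + d) m') d m').1 =
          (fun (d : Int) =>
            if z then
              if d == 0 then pvPureSum t (b && (d == pvLimit b c)) true 0
              else pvPureSum t (b && (d == pvLimit b c)) false d
            else pvPureSum t (b && (d == pvLimit b c)) false (ssum + d)) d ∧
        pvCohSum s ((fun (d : Int) (m' : pvMemoSum) =>
            if z then
              if d == 0 then pvDpSum t (b && (d == pvLimit b c)) true 0 m'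
              else pvDpSum t (b && (d == pvLimit b c)) false d m'
            else pvDpSum t (b && (d == pvLimit b c)) false (ssum + d) m') d m').2 := by
      intro d _ m' hm'
      cases z with
      | true =>
        by_cases hd : (d == 0) = true <;> simp only [hd, if_true, Bool.false_eq_true, if_false] <;>
          · apply ih htsuf
            exact hm'
      | false =>
        simp only [Bool.false_eq_true, if_false]
        apply ih htsuf
        exact hm'
    rcases hv : m[(t.length + 1, b, z, ssum)]? with _ | v
    · obtain ⟨h1, h2⟩ := pv_foldl_pair (pvCohSum s) (PySem.List.pyRange 0 (pvLimit b c + 1) 1)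
        _ _ hf 0 m hm
      constructor
      · show (pvDpSum (c :: t) b z ssum m).1 = _
        simp only [pvDpSum, hv]
        exact h1
      · show pvCohSum s (pvDpSum (c :: t) b z ssum m).2
        simp only [pvDpSum, hv]
        intro k' b' z' s' v' hv'
        rw [Std.HashMap.getElem?_insert] at hv'
        split at hv'
        · rename_i heq
          obtain ⟨hk, hb, hz, hs⟩ := by simpa using (beq_iff_eq.mp heq)
          cases hv'
          subst hk hb hz hs
          rw [hdrop]
          exact h1
        · exact h2 _ _ _ _ _ hv'
    · have hval := hm _ _ _ _ _ hv
      rw [hdrop] at hval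
      constructor
      · show (pvDpSum (c :: t) b z ssum m).1 = _
        simp only [pvDpSum, hv]
        exact hval
      · show pvCohSum s (pvDpSum (c :: t) b z ssum m).2
        simp only [pvDpSum, hv]
        exact hm

-- memoized dp = pure dp (B: both)
theorem pv_memBoth (s : List Char) :
    ∀ ds, ds <:+ s → ∀ (b z : Bool) (last cur ssum : Int) (m : pvMemoBoth), pvCohBoth s m →
      (pvDpBoth ds b z last cur ssum m).1 = pvPureBoth ds b z last cur ssum ∧
        pvCohBoth s (pvDpBoth ds b z last cur ssum m).2 := by
  intro ds
  induction ds with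
  | nil => intro _ b z last cur ssum m hm; exact ⟨rfl, hm⟩
  | cons c t ih =>
    intro hsuf b z last cur ssum m hm
    have htsuf : t <:+ s := (List.suffix_cons c t).trans hsuf
    have hdrop := pv_drop_suffix s c t hsuf
    have hf : ∀ d ∈ PySem.List.pyRange 0 (pvLimit b c + 1) 1, ∀ m', pvCohBoth s m' →
        ((fun (d : Int) (m' : pvMemoBoth) =>
            if z then
              if d == 0 then pvDpBoth t (b && (d == pvLimit b c)) true (-1) 0 0 m'
              else pvDpBoth t (b && (d == pvLimit b c)) false d 0 d m'
            else pvDpBoth t (b && (d == pvLimit b c)) false d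
              (pvNextDir cur last d) (ssum + d) m') d m').1 =
          (fun (d : Int) =>
            if z then
              if d == 0 then pvPureBoth t (b && (d == pvLimit b c)) true (-1) 0 0
              else pvPureBoth t (b && (d == pvLimit b c)) false d 0 d
            else pvPureBoth t (b && (d == pvLimit b c)) false d
              (pvNextDir cur last d) (ssum + d)) d ∧
        pvCohBoth s ((fun (d : Int) (m' : pvMemoBoth) =>
            if z then
              if d == 0 then pvDpBoth t (b && (d == pvLimit b c)) true (-1) 0 0 m'
              else pvDpBoth t (b && (d == pvLimit b c)) false d 0 d m'
            else pvDpBoth t (b && (d == pvLimit b c)) false d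
              (pvNextDir cur last d) (ssum + d) m') d m').2 := by
      intro d _ m' hm'
      cases z with
      | true =>
        by_cases hd : (d == 0) = true <;> simp only [hd, if_true, Bool.false_eq_true, if_false] <;>
          · apply ih htsuf
            exact hm'
      | false =>
        simp only [Bool.false_eq_true, if_false]
        apply ih htsuf
        exact hm'
    rcases hv : m[(t.length + 1, b, z, last, cur, ssum)]? with _ | v
    · obtain ⟨h1, h2⟩ := pv_foldl_pair (pvCohBoth s) (PySem.List.pyRange 0 (pvLimit b c + 1) 1)
        _ _ hf 0 m hm
      constructor
      · show (pvDpBoth (c :: t) b z last cur ssum m).1 = _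
        simp only [pvDpBoth, hv]
        exact h1
      · show pvCohBoth s (pvDpBoth (c :: t) b z last cur ssum m).2
        simp only [pvDpBoth, hv]
        intro k' b' z' l' c' s' v' hv'
        rw [Std.HashMap.getElem?_insert] at hv'
        split at hv'
        · rename_i heq
          obtain ⟨hk, hb, hz, hl, hc, hs⟩ := by simpa using (beq_iff_eq.mp heq)
          cases hv'
          subst hk hb hz hl hc hs
          rw [hdrop]
          exact h1
        · exact h2 _ _ _ _ _ _ _ hv'
    · have hval := hm _ _ _ _ _ _ _ hv
      rw [hdrop] at hval
      constructor
      · show (pvDpBoth (c :: t) b z last cur ssum m).1 = _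
        simp only [pvDpBoth, hv]
        exact hval
      · show pvCohBoth s (pvDpBoth (c :: t) b z last cur ssum m).2
        simp only [pvDpBoth, hv]
        exact hm

theorem pv_foldl_add_shift (f : Int → Int) (xs : List Int) (c : Int) :
    xs.foldl (fun a d => a + f d) c = c + xs.foldl (fun a d => a + f d) 0 := by
  induction xs generalizing c with
  | nil => simp
  | cons x xs ih =>
    simp only [List.foldl_cons]
    rw [ih (c + f x), ih (0 + f x)]
    ring

-- inclusion-exclusion distributes through a sum-accumulating foldl
theorem pv_foldl_add_sub (xs : List Int) (f g h k : Int → Int)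
    (H : ∀ d ∈ xs, f d = g d + h d - k d) :
    xs.foldl (fun a d => a + f d) 0 =
      xs.foldl (fun a d => a + g d) 0 + xs.foldl (fun a d => a + h d) 0
        - xs.foldl (fun a d => a + k d) 0 := by
  induction xs with
  | nil => simp
  | cons x xs ih =>
    simp only [List.foldl_cons]
    rw [pv_foldl_add_shift f, pv_foldl_add_shift g, pv_foldl_add_shift h, pv_foldl_add_shift k]
    have hx := H x (List.mem_cons_self ..)
    have := ih (fun d hd => H d (List.mem_cons_of_mem _ hd))
    omega

-- core invariant: A's full-state dp = mono dp + goodsum dp - both dp (memo-free versions)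
theorem pv_dp_ie (ds : List Char) :
    ∀ (b z : Bool) (last cur ssum : Int),
      pvPureA ds b z last cur ssum =
        pvPureMono ds b z last cur + pvPureSum ds b z ssum - pvPureBoth ds b z last cur ssum := by
  induction ds with
  | nil =>
    intro b z last cur ssum
    simp only [pvPureA, pvPureMono, pvPureSum, pvPureBoth]
    cases z with
    | true => simp
    | false =>
      simp only [Bool.false_eq_true, if_false]
      by_cases h1 : cur ≠ 3 <;> by_cases h2 : PySem.Set.contains pvGoodSums ssum = true <;>
        simp [h1]
  | cons c t ih =>
    intro b z last cur ssum
    simp only [pvPureA, pvPureMono, pvPureSum, pvPureBoth, pvNextDirA, pvNextDir]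
    apply pv_foldl_add_sub
    intro d _
    cases z with
    | true =>
      by_cases hd : (d == 0) = true <;> simp only [hd, if_true, Bool.false_eq_true, if_false] <;>
        exact ih ..
    | false =>
      simp only [Bool.false_eq_true, if_false]
      exact ih ..

theorem pv_coh_emptyA (s : List Char) : pvCohA s ∅ := by
  intro k b z last cur ssum v hv; simp at hv

theorem pv_coh_emptyMono (s : List Char) : pvCohMono s ∅ := by
  intro k b z last cur v hv; simp at hv

theorem pv_coh_emptySum (s : List Char) : pvCohSum s ∅ := by
  intro k b z ssum v hv; simp at hv

theorem pv_coh_emptyBoth (s : List Char) : pvCohBoth s ∅ := by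
  intro k b z last cur ssum v hv; simp at hv

theorem pv_solve_eq (n : Int) : pvSolveA n = pvSolveAlt n := by
  simp only [pvSolveA, pvSolveAlt, pvCountMono, pvCountGoodsum, pvCountBoth]
  by_cases h : (n == 0) = true
  · simp [h]
  · simp only [h, Bool.false_eq_true, if_false]
    rw [(pv_memA _ _ (List.suffix_refl _) true true (-1) 0 0 ∅ (pv_coh_emptyA _)).1,
      (pv_memMono _ _ (List.suffix_refl _) true true (-1) 0 ∅ (pv_coh_emptyMono _)).1,
      (pv_memSum _ _ (List.suffix_refl _) true true 0 ∅ (pv_coh_emptySum _)).1,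
      (pv_memBoth _ _ (List.suffix_refl _) true true (-1) 0 0 ∅ (pv_coh_emptyBoth _)).1]
    exact pv_dp_ie ..

-- ===== VERDICT (by name: the statement is the Claim_ definition above) =====
theorem countFancy_spec : Claim_equal_countFancy := by
  intro l r _ _
  show countFancy l r = countFancy_alt l r
  simp only [countFancy, countFancy_alt, pv_solve_eq]
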